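-- pv_equiv track=rewrite | github.com/Tejasj77/Data-Structures-and-Algorithms | Recursion/Minimum_tiles_required_to_cover_area/attempt.py | minTiles
-- ===== SOURCE A (Python) =====
-- def minTiles(m,n):
--      if n==0 or m==0:
--          return 0
--      elif m%2==0 and n%2==1:
--          return (m + minTiles(int(m/2),int(n/2)))
--      elif m%2==1 and n%2 ==0:
--          return (n + minTiles(int(m/2),int(n/2)))
--      else:
--          return (n+ m - 1 + minTiles(int(m/2),int(n/2)))
-- ===== SOURCE B (Python) =====
-- def minTiles(m, n):
--     total = 0
--     while m != 0 and n != 0: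
--         if m % 2 == 0 and n % 2 == 1:
--             total += m
--         elif m % 2 == 1 and n % 2 == 0:
--             total += n
--         else:
--             total += n + m - 1
--         m, n = int(m / 2), int(n / 2)
--     return total
-- ===== Notes on version B (the rewrite author's own statement) =====
-- stated objective: alternative
-- what changed: Replaced the non-tail recursion by an iterative while loop with an explicit accumulator (same halving steps, no call stack).
import Mathlib
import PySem

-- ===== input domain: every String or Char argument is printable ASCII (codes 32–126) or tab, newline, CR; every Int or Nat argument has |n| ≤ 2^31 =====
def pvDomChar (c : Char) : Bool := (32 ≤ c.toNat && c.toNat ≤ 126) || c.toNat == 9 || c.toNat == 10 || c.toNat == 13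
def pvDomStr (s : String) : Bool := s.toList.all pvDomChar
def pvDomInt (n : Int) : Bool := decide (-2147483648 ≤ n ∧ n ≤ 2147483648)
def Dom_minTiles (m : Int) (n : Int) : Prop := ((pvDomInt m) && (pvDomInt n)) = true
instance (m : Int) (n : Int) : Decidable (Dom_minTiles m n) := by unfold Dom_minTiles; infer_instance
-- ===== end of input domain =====

-- B replaces A's non-tail recursion by an iterative loop with an explicit accumulator; same cost.
-- Python's int(m/2) truncates toward zero: exact on Dom (|m| ≤ 2^31 < 2^53), ported as Int.tdiv.

-- termination helper for both ports (cited by decreasing_by)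
theorem pvTdiv2_natAbs (m : Int) : (m.tdiv 2).natAbs = m.natAbs / 2 := by
  rw [Int.natAbs_tdiv]; rfl

-- ===== PORT A =====
def minTiles (m : Int) (n : Int) : Int :=
  if n = 0 ∨ m = 0 then 0
  else if PySem.Int.mod m 2 = 0 ∧ PySem.Int.mod n 2 = 1 then
    m + minTiles (m.tdiv 2) (n.tdiv 2)
  else if PySem.Int.mod m 2 = 1 ∧ PySem.Int.mod n 2 = 0 then
    n + minTiles (m.tdiv 2) (n.tdiv 2)
  else
    n + m - 1 + minTiles (m.tdiv 2) (n.tdiv 2)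
termination_by m.natAbs + n.natAbs
decreasing_by
  all_goals
    have hm : m.natAbs ≠ 0 := Int.natAbs_ne_zero.mpr (by tauto)
    rw [pvTdiv2_natAbs, pvTdiv2_natAbs]
    omega

-- ===== PORT B =====
-- the while loop of Source B, as a tail-recursive function carrying the accumulator `total`
def minTilesLoop (m : Int) (n : Int) (total : Int) : Int :=
  if m ≠ 0 ∧ n ≠ 0 then
    minTilesLoop (m.tdiv 2) (n.tdiv 2)
      (total +
        (if PySem.Int.mod m 2 = 0 ∧ PySem.Int.mod n 2 = 1 then m
         else if PySem.Int.mod m 2 = 1 ∧ PySem.Int.mod n 2 = 0 then n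
         else n + m - 1))
  else total
termination_by m.natAbs + n.natAbs
decreasing_by
  have hm : m.natAbs ≠ 0 := Int.natAbs_ne_zero.mpr (by tauto)
  rw [pvTdiv2_natAbs, pvTdiv2_natAbs]
  omega

def minTiles_alt (m : Int) (n : Int) : Int := minTilesLoop m n 0

-- ===== PRECONDITION & SPEC =====
def Spec_minTiles (m : Int) (n : Int) (out : Int) : Prop := out = minTiles_alt m n
instance (m : Int) (n : Int) (out : Int) : Decidable (Spec_minTiles m n out) := by unfold Spec_minTiles; infer_instance

-- ===== CLAIM (what is proved, stated in full; the proofs are below) =====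
def Claim_equal_minTiles : Prop := ∀ (m : Int) (n : Int), Dom_minTiles m n → Spec_minTiles m n (minTiles m n)

-- ===== LEMMAS AND PROOFS =====

-- loop invariant: running the loop from `total` adds exactly A's recursive sum
theorem minTilesLoop_eq (m : Int) (n : Int) (total : Int) :
    minTilesLoop m n total = total + minTiles m n := by
  by_cases h : m ≠ 0 ∧ n ≠ 0
  · rw [minTilesLoop.eq_def, if_pos h, minTilesLoop_eq]
    conv_rhs => rw [minTiles.eq_def]
    split_ifs
    all_goals try (exact absurd ‹n = 0 ∨ m = 0› (by tauto))
    all_goals ring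
  · rw [minTilesLoop.eq_def, if_neg h]
    conv_rhs => rw [minTiles.eq_def]
    rw [if_pos (by tauto)]
    ring
termination_by m.natAbs + n.natAbs
decreasing_by
  have hm : m.natAbs ≠ 0 := Int.natAbs_ne_zero.mpr (by tauto)
  rw [pvTdiv2_natAbs, pvTdiv2_natAbs]
  omega

-- ===== VERDICT (by name: the statement is the Claim_ definition above) =====
theorem minTiles_spec : Claim_equal_minTiles := by
  intro m n _
  unfold Spec_minTiles minTiles_alt
  rw [minTilesLoop_eq]
  ring
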